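-- pv_equiv track=rewrite | github.com/timvieira/arsenal | arsenal/maths/combinatorics/basics.py | kleene
-- ===== SOURCE A (Python) =====
-- def kleene(S, n=None):
--     """
--     Kleene closure of S: The set of strings over the alphabet `S` with the option
--     to specify a maximum length `n` or leave as `None`.
--     """
--
--     def _kleene(n):
--         if n is not None and n < 0: return
--         yield ()
--         for x in _kleene(n if n is None else n-1):
--             for s in S:
--                 yield x + (s,)
--
--     return _kleene(n)
-- ===== SOURCE B (Python) =====
-- from itertools import chain, count, product
--
--
-- def kleene(S, n=None):
--     """
--     Kleene closure of S: The set of strings over the alphabet `S` with the option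
--     to specify a maximum length `n` or leave as `None`.
--     """
--     levels = count() if n is None else range(max(n + 1, 0))
--     def _gen():
--         yield from chain.from_iterable(product(S, repeat=i) for i in levels)
--     return _gen()
-- ===== Notes on version B (the rewrite author's own statement) =====
-- stated objective: idiomatic
-- what changed: Replaces A's recursive generator (each level built by extending every word of the previous level on the right) with itertools: each length level is produced independently by product(S, repeat=i) and the levels are chained, building words front-first instead of back-first.
import Mathlib
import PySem

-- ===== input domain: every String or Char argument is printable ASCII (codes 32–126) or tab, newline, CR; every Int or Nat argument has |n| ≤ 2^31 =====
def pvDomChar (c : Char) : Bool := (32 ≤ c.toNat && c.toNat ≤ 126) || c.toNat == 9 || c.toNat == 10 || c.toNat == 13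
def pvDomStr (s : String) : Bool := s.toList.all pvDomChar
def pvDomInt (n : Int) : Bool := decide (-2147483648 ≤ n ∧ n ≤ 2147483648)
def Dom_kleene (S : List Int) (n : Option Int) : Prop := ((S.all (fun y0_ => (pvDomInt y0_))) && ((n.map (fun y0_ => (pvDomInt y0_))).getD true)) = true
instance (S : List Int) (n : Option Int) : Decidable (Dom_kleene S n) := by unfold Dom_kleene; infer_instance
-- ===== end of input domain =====

-- B builds each length level independently with product-style front-first construction
-- instead of A's recursive extension of the previous level; equivalence of RETURN values
-- is claimed for finite n (Pre_ excludes n = None, where both are infinite generators).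

-- ===== PORT A =====
-- _kleene(n): if n < 0: return; yield (); for x in _kleene(n-1): for s in S: yield x+(s,)
def kleeneAux (S : List Int) (n : Int) : List (List Int) :=
  if n < 0 then []
  else [] :: (kleeneAux S (n - 1)).flatMap (fun x => S.map (fun s => x ++ [s]))
termination_by (n + 1).toNat
decreasing_by omega

def kleene (S : List Int) (n : Option Int) : List (List Int) :=
  match n with
  | none => []          -- n = None: infinite generator; outside Pre_kleene, value irrelevant
  | some m => kleeneAux S m

-- ===== PORT B =====
-- product(S, repeat=i): lexicographic, first coordinate varies slowest
def prodPow (S : List Int) : Nat → List (List Int)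
  | 0 => [[]]
  | i + 1 => S.flatMap (fun s => (prodPow S i).map (fun t => s :: t))

def kleene_alt (S : List Int) (n : Option Int) : List (List Int) :=
  match n with
  | none => []          -- n = None: infinite; outside Pre_kleene
  | some m =>
    if m < 0 then []
    else (List.range (m + 1).toNat).flatMap (fun i => prodPow S i)

-- ===== PRECONDITION & SPEC =====
-- Pre_ excludes n = None: there A returns an infinite (or RecursionError-raising) generator,
-- which has no finite list value to compare.
def Pre_kleene (S : List Int) (n : Option Int) : Prop := n ≠ none
instance (S : List Int) (n : Option Int) : Decidable (Pre_kleene S n) := by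
  unfold Pre_kleene; infer_instance
def pvWitness_kleene : List Int × Option Int := ([1, 2], some 2)

-- ===== PRECONDITION & SPEC =====
def Spec_kleene (S : List Int) (n : Option Int) (out : List (List Int)) : Prop := out = kleene_alt S n
instance (S : List Int) (n : Option Int) (out : List (List Int)) : Decidable (Spec_kleene S n out) := by unfold Spec_kleene; infer_instance

-- ===== CLAIM (what is proved, stated in full; the proofs are below) =====
def Claim_equal_kleene : Prop := ∀ (S : List Int) (n : Option Int), Dom_kleene S n → Pre_kleene S n → Spec_kleene S n (kleene S n)

-- ===== LEMMAS AND PROOFS =====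

-- Front-first levels satisfy A's back-first recurrence.
theorem prodPow_succ_back (S : List Int) (i : Nat) :
    prodPow S (i + 1) = (prodPow S i).flatMap (fun x => S.map (fun s => x ++ [s])) := by
  induction i with
  | zero => simp [prodPow, List.map_eq_flatMap]
  | succ j ih =>
    calc prodPow S (j + 2)
        = S.flatMap (fun s => (prodPow S (j + 1)).map (fun t => s :: t)) := rfl
      _ = S.flatMap (fun s =>
            ((prodPow S j).flatMap (fun x => S.map (fun u => x ++ [u]))).map
              (fun t => s :: t)) := by rw [ih]
      _ = (prodPow S (j + 1)).flatMap (fun x => S.map (fun s => x ++ [s])) := by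
            simp [prodPow, List.flatMap_assoc, List.flatMap_map, List.map_flatMap,
              List.map_map, Function.comp_def]

theorem kleeneAux_eq (S : List Int) (j : Nat) :
    kleeneAux S (j : Int) = (List.range (j + 1)).flatMap (fun i => prodPow S i) := by
  induction j with
  | zero =>
    rw [kleeneAux, kleeneAux]
    norm_num [prodPow]
  | succ k ih =>
    rw [kleeneAux]
    have h1 : ¬ ((k + 1 : Nat) : Int) < 0 := by omega
    have h2 : ((k + 1 : Nat) : Int) - 1 = (k : Int) := by push_cast; ring
    rw [if_neg h1, h2, ih, List.flatMap_assoc, List.range_succ_eq_map (n := k + 1)]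
    simp only [List.flatMap_cons, List.flatMap_map]
    show _ = [[]] ++ _
    rw [List.singleton_append]
    congr 1
    exact List.flatMap_congr (fun i _ => (prodPow_succ_back S i).symm)

-- ===== VERDICT (by name: the statement is the Claim_ definition above) =====
theorem kleene_spec : Claim_equal_kleene := by
  intro S n _ hpre
  unfold Spec_kleene
  match n with
  | none => exact absurd rfl hpre
  | some m =>
    show kleeneAux S m =
      if m < 0 then [] else (List.range (m + 1).toNat).flatMap (fun i => prodPow S i)
    by_cases hm : m < 0
    · rw [if_pos hm, kleeneAux, if_pos hm]
    · rw [if_neg hm]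
      have hcast : ((m.toNat : Nat) : Int) = m := Int.toNat_of_nonneg (by omega)
      have htn : (m + 1).toNat = m.toNat + 1 := by omega
      rw [htn, ← hcast]
      exact kleeneAux_eq S m.toNat
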